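-- pv_equiv track=rewrite | github.com/GoddessLuBoYan/mahjong-agent-2025 | botzone-local/mahjong_race_mp.py | calc_race_score
-- ===== SOURCE A (Python) =====
-- def calc_race_score(scores):
--
--     race_score = {0: 0, 1: 0, 2: 0, 3: 0}
--     score_rank = [4, 3, 2, 1]
--     score_ids = [(i, [j[0] for j in scores.items() if j[1] == i]) for i in sorted(set(scores.values()), reverse=True)]
--
--     rank_id = 0
--     for (score, playerids) in score_ids:
--         rank = score_rank[rank_id]
--         for playerid in playerids:
--             race_score[playerid] += rank
--         rank_id += 1
--
--     return race_score
-- ===== SOURCE B (Python) =====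
-- def calc_race_score(scores):
--     race_score = {0: 0, 1: 0, 2: 0, 3: 0}
--     values = set(scores.values())
--     for playerid, score in scores.items():
--         race_score[playerid] += 4 - sum(1 for v in values if score < v)
--     return race_score
-- ===== Notes on version B (the rewrite author's own statement) =====
-- stated objective: simpler
-- what changed: B drops A's sort of the distinct values and its per-value grouping rescans: one pass over scores.items() adds, for each player, 4 minus the number of distinct score values strictly greater than his own.
import Mathlib
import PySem

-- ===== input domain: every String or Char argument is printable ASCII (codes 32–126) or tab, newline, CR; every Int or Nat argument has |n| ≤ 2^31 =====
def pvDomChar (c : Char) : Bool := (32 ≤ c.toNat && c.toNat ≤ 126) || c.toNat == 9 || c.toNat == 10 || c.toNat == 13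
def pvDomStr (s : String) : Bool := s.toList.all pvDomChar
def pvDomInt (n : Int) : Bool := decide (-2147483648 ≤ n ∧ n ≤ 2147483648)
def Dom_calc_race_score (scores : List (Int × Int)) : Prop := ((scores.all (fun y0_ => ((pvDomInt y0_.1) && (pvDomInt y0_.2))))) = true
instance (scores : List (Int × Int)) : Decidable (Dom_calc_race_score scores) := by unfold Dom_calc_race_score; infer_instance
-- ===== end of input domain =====

-- B computes each player's rank directly in one pass over the items, as 4 minus the number of distinct
-- score values above his own, removing A's sort of the distinct values and its per-value rescans (simpler).

-- ===== PORT A =====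
-- [j[0] for j in scores.items() if j[1] == i]
def pvGroup (d : PySem.Dict Int Int) (i : Int) : List Int :=
  (d.items.filter (fun j => j.2 == i)).map (fun j => j.1)

-- body of A's outer loop: state = (race_score, rank_id)
def pvStep (st : PySem.Dict Int Int × Int) (g : Int × List Int) : PySem.Dict Int Int × Int :=
  let rank := PySem.List.pyGetD [4, 3, 2, 1] st.2 0   -- score_rank[rank_id]; IndexError only outside Pre_
  (g.2.foldl (fun rs pid => rs.modify pid 0 (· + rank)) st.1, st.2 + 1)
  -- race_score[playerid] += rank; KeyError only outside Pre_ (modify's default is unreachable there)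

def calc_race_score (scores : List (Int × Int)) : List (Int × Int) :=
  let d := PySem.Dict.ofList scores
  let race_score : PySem.Dict Int Int := PySem.Dict.ofList [(0, 0), (1, 0), (2, 0), (3, 0)]
  let score_ids : List (Int × List Int) :=
    (PySem.List.sorted (PySem.Set.ofList d.values) (fun x => x) true).map (fun i => (i, pvGroup d i))
  (score_ids.foldl pvStep (race_score, 0)).1.items

-- ===== PORT B =====
def calc_race_score_alt (scores : List (Int × Int)) : List (Int × Int) :=
  let d := PySem.Dict.ofList scores
  let race_score : PySem.Dict Int Int := PySem.Dict.ofList [(0, 0), (1, 0), (2, 0), (3, 0)]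
  let values := PySem.Set.ofList d.values
  (d.items.foldl (fun rs pv =>
      rs.modify pv.1 0
        (· + (4 - ((values.filter (fun v => decide (pv.2 < v))).map (fun _ => (1 : Int))).sum)))
    race_score).items

-- ===== PRECONDITION & SPEC =====
-- Pre_ excludes exactly the inputs where A raises: a player id outside {0,1,2,3} hits
-- race_score[playerid] (KeyError) or, via >4 distinct keys, score_rank[rank_id] (IndexError).
def Pre_calc_race_score (scores : List (Int × Int)) : Prop :=
  ∀ q ∈ scores, q.1 = 0 ∨ q.1 = 1 ∨ q.1 = 2 ∨ q.1 = 3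
instance (scores : List (Int × Int)) : Decidable (Pre_calc_race_score scores) := by
  unfold Pre_calc_race_score; infer_instance

def pvWitness_calc_race_score : List (Int × Int) := [(0, 10), (1, 5), (2, 10), (3, 1)]

def Spec_calc_race_score (scores : List (Int × Int)) (out : List (Int × Int)) : Prop :=
  out = calc_race_score_alt scores
instance (scores : List (Int × Int)) (out : List (Int × Int)) : Decidable (Spec_calc_race_score scores out) := by
  unfold Spec_calc_race_score; infer_instance

-- ===== CLAIM (what is proved, stated in full; the proofs are below) =====
def Claim_equal_calc_race_score : Prop := ∀ (scores : List (Int × Int)), Dom_calc_race_score scores → Pre_calc_race_score scores → Spec_calc_race_score scores (calc_race_score scores)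

-- ===== LEMMAS AND PROOFS =====

-- total rank received by player p over the remaining groups, starting at rank index t
def pvAux (ls : List (Int × List Int)) (t : Int) (p : Int) : Int :=
  match ls with
  | [] => 0
  | g :: rest => (g.2.count p : Int) * PySem.List.pyGetD [4, 3, 2, 1] t 0 + pvAux rest (t + 1) p

theorem pv_inner_getD (pids : List Int) (r : Int) (rs : PySem.Dict Int Int) (p : Int) :
    (pids.foldl (fun rs pid => rs.modify pid 0 (· + r)) rs).getD p 0
      = rs.getD p 0 + (pids.count p : Int) * r := by
  induction pids generalizing rs with
  | nil => simp
  | cons q rest ih =>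
      simp only [List.foldl_cons, ih, PySem.Dict.getD_modify, List.count_cons]
      by_cases h : p = q
      · subst h; simp; ring
      · have h' : ¬ q = p := fun hh => h hh.symm
        simp [h, h']

theorem pv_fold_getD (ls : List (Int × List Int)) (rs : PySem.Dict Int Int) (t p : Int) :
    ((ls.foldl pvStep (rs, t)).1).getD p 0 = rs.getD p 0 + pvAux ls t p := by
  induction ls generalizing rs t with
  | nil => simp [pvAux]
  | cons g rest ih =>
      simp only [List.foldl_cons, pvAux]
      rw [show pvStep (rs, t) g
            = (g.2.foldl (fun rs pid => rs.modify pid 0 (· + PySem.List.pyGetD [4,3,2,1] t 0)) rs, t + 1) from rfl]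
      rw [ih, pv_inner_getD]; ring

theorem pv_set_update_eq_self (l : List Int) (s : PySem.Set Int) (h : ∀ x ∈ l, x ∈ s) :
    PySem.Set.update s l = s := by
  induction l generalizing s with
  | nil => rfl
  | cons x rest ih =>
      have hx : PySem.Set.add s x = s := by
        simp [PySem.Set.add, PySem.Set.contains]
        exact h x (by simp)
      show PySem.Set.update (PySem.Set.add s x) rest = s
      rw [hx]; exact ih s (fun y hy => h y (by simp [hy]))

theorem pv_fold_keys (ls : List (Int × List Int)) (rs : PySem.Dict Int Int) (t : Int)
    (h : ∀ g ∈ ls, ∀ x ∈ g.2, x ∈ rs.keys) :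
    ((ls.foldl pvStep (rs, t)).1).keys = rs.keys := by
  induction ls generalizing rs t with
  | nil => rfl
  | cons g rest ih =>
      simp only [List.foldl_cons]
      rw [show pvStep (rs, t) g
            = (g.2.foldl (fun rs pid => rs.modify pid 0 (· + PySem.List.pyGetD [4,3,2,1] t 0)) rs, t + 1) from rfl]
      have hk : (g.2.foldl (fun rs pid => rs.modify pid 0 (· + PySem.List.pyGetD [4,3,2,1] t 0)) rs).keys = rs.keys := by
        rw [PySem.Dict.keys_foldl_modify g.2 0 (fun _ _ => (· + PySem.List.pyGetD [4,3,2,1] t 0)) rs]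
        exact pv_set_update_eq_self g.2 rs.keys (h g (by simp))
      rw [ih _ (t + 1) (by intro g' hg' x hx; rw [hk]; exact h g' (by simp [hg']) x hx), hk]

theorem pv_group_mem (d : PySem.Dict Int Int) (i p : Int) :
    p ∈ pvGroup d i ↔ (p, i) ∈ d.items := by
  simp only [pvGroup, List.mem_map, List.mem_filter]
  constructor
  · rintro ⟨⟨a, b⟩, ⟨hj, hji⟩, rfl⟩
    have hb : b = i := by simpa using hji
    subst hb; exact hj
  · intro h; exact ⟨(p, i), ⟨h, by simp⟩, rfl⟩

theorem pv_group_nodup (d : PySem.Dict Int Int) (hnd : d.keys.Nodup) (i : Int) :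
    (pvGroup d i).Nodup := by
  have hsub : ((d.items.filter (fun j => j.2 == i)).map (fun j => j.1)).Sublist
      (d.items.map (fun j => j.1)) := List.Sublist.map (fun j : Int × Int => j.1) List.filter_sublist
  exact List.Nodup.sublist hsub hnd

theorem pv_group_count (d : PySem.Dict Int Int) (hnd : d.keys.Nodup) (i p : Int) :
    ((pvGroup d i).count p : Int) = if d.get? p = some i then 1 else 0 := by
  by_cases hm : p ∈ pvGroup d i
  · have : (p, i) ∈ d.items := (pv_group_mem d i p).mp hm
    rw [List.count_eq_one_of_mem (pv_group_nodup d hnd i) hm,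
        if_pos ((PySem.Dict.get?_eq_some_iff_mem_items d p i hnd).mpr this)]
    rfl
  · rw [List.count_eq_zero_of_not_mem hm, if_neg]
    · rfl
    · intro hg
      exact hm ((pv_group_mem d i p).mpr (PySem.Dict.mem_items_of_get?_eq_some d hg))

theorem pv_aux_none (d : PySem.Dict Int Int) (hnd : d.keys.Nodup) (ws : List Int) (p : Int)
    (h : d.get? p = none) (t : Int) :
    pvAux (ws.map (fun i => (i, pvGroup d i))) t p = 0 := by
  induction ws generalizing t with
  | nil => rfl
  | cons a rest ih =>
      simp only [List.map_cons, pvAux, pv_group_count d hnd, h]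
      simp [ih]

theorem pv_aux_not_mem (d : PySem.Dict Int Int) (hnd : d.keys.Nodup) (ws : List Int) (p v : Int)
    (h : d.get? p = some v) (hv : v ∉ ws) (t : Int) :
    pvAux (ws.map (fun i => (i, pvGroup d i))) t p = 0 := by
  induction ws generalizing t with
  | nil => rfl
  | cons a rest ih =>
      simp only [List.map_cons, pvAux, pv_group_count d hnd, h]
      have hva : v ≠ a := fun hva => hv (by simp [hva])
      rw [if_neg (by simpa using hva), ih (fun hm => hv (by simp [hm]))]
      ring

theorem pv_aux_some (d : PySem.Dict Int Int) (hnd : d.keys.Nodup) (ws : List Int) (p v : Int)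
    (h : d.get? p = some v) (hpw : ws.Pairwise (· > ·)) (hv : v ∈ ws) (t : Int) :
    pvAux (ws.map (fun i => (i, pvGroup d i))) t p
      = PySem.List.pyGetD [4, 3, 2, 1] (t + (ws.countP (fun w => decide (v < w)) : Int)) 0 := by
  induction ws generalizing t with
  | nil => simp at hv
  | cons a rest ih =>
      simp only [List.map_cons, pvAux, pv_group_count d hnd, h, List.countP_cons]
      rcases List.pairwise_cons.mp hpw with ⟨ha, hrest⟩
      by_cases hva : v = a
      · subst hva
        have hnm : v ∉ rest := fun hm => absurd (ha v hm) (by omega)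
        rw [if_pos rfl, pv_aux_not_mem d hnd rest p v h hnm]
        have hc : rest.countP (fun w => decide (v < w)) = 0 := by
          apply List.countP_eq_zero.mpr
          intro w hw; simpa using (by have := ha w hw; omega : ¬ v < w)
        simp [hc]
      · have hvr : v ∈ rest := by rcases (List.mem_cons.mp hv) with h1 | h1; exact absurd h1 hva; exact h1
        have hlt : v < a := ha v hvr
        rw [if_neg (by simpa using fun hh : v = a => hva hh), ih hrest hvr (t + 1)]
        rw [if_pos (by simpa using hlt)]
        have : t + 1 + (rest.countP (fun w => decide (v < w)) : Int)
             = t + ((rest.countP (fun w => decide (v < w)) + 1 : Nat) : Int) := by push_cast; ring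
        simp [this]

theorem pv_countP_lt (ws : List Int) (v : Int) (hv : v ∈ ws) :
    ws.countP (fun w => decide (v < w)) < ws.length := by
  have h1 : 0 < ws.countP (fun w => !decide (v < w)) :=
    List.countP_pos_iff.mpr ⟨v, hv, by simp⟩
  have h2 := List.length_eq_countP_add_countP (l := ws) (fun w => decide (v < w))
  have h3 : ws.countP (fun a => decide ¬(decide (v < a) = true)) = ws.countP (fun w => !decide (v < w)) := by
    apply List.countP_congr; intro a _; simp
  omega

theorem pv_update_length_le (xs : List Int) (s : PySem.Set Int) :
    (PySem.Set.update s xs).length ≤ s.length + xs.length := by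
  induction xs generalizing s with
  | nil => simp [PySem.Set.update]
  | cons x rest ih =>
      have hadd : (PySem.Set.add s x).length ≤ s.length + 1 := by
        simp only [PySem.Set.add]; split <;> simp
      calc (PySem.Set.update (PySem.Set.add s x) rest).length
          ≤ (PySem.Set.add s x).length + rest.length := ih (PySem.Set.add s x)
        _ ≤ s.length + (x :: rest).length := by simp at hadd ⊢; omega

theorem pv_ofList_length_le (xs : List Int) : (PySem.Set.ofList xs).length ≤ xs.length := by
  have := pv_update_length_le xs PySem.Set.empty
  simpa [PySem.Set.ofList, PySem.Set.update, PySem.Set.empty] using this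

theorem pv_b_getD (g : Int × Int → Int) (items : List (Int × Int)) (rs : PySem.Dict Int Int) (p : Int) :
    (items.foldl (fun rs pv => rs.modify pv.1 0 (· + g pv)) rs).getD p 0
      = rs.getD p 0 + ((items.filter (fun pv => pv.1 == p)).map g).sum := by
  induction items generalizing rs with
  | nil => simp
  | cons pv rest ih =>
      simp only [List.foldl_cons, ih, PySem.Dict.getD_modify, List.filter_cons]
      by_cases h : pv.1 = p
      · simp [h]; ring
      · have h' : ¬ p = pv.1 := fun hh => h hh.symm
        simp [h, h']

theorem pv_eq_singleton (l : List (Int × Int)) (a : Int × Int) (hnd : l.Nodup)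
    (hall : ∀ x ∈ l, x = a) (hmem : a ∈ l) : l = [a] := by
  cases l with
  | nil => simp at hmem
  | cons x rest =>
      have hx : x = a := hall x (by simp)
      subst hx
      cases rest with
      | nil => rfl
      | cons y t =>
          have hy : y = x := hall y (by simp)
          have : x ∉ y :: t := (List.nodup_cons.mp hnd).1
          exact absurd (by simp [hy]) this

theorem pv_filter_items_none (d : PySem.Dict Int Int) (p : Int)
    (hget : d.get? p = none) :
    d.items.filter (fun pv => pv.1 == p) = [] := by
  rw [List.filter_eq_nil_iff]
  intro pv hpv hp
  have hp1 : pv.1 = p := by simpa using hp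
  have : p ∈ d.keys := hp1 ▸ PySem.Dict.mem_keys_of_mem_items d hpv
  exact (PySem.Dict.get?_eq_none_iff_not_mem_keys d p).mp hget this

theorem pv_filter_items_some (d : PySem.Dict Int Int) (hnd : d.keys.Nodup) (p v : Int)
    (hget : d.get? p = some v) :
    d.items.filter (fun pv => pv.1 == p) = [(p, v)] := by
  have hkm : (d.items.map (fun x : Int × Int => x.1)).Nodup := hnd
  have hitems_nd : d.items.Nodup := List.Nodup.of_map (fun x : Int × Int => x.1) hkm
  apply pv_eq_singleton
  · exact List.Nodup.sublist List.filter_sublist hitems_nd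
  · intro x hx
    rcases List.mem_filter.mp hx with ⟨hxm, hx1⟩
    have hx1' : x.1 = p := by simpa using hx1
    have : d.get? x.1 = some x.2 := PySem.Dict.get?_of_mem_items d (by simpa using hxm) hnd
    rw [hx1', hget] at this
    have : x.2 = v := by injection this.symm
    cases x; simp_all
  · exact List.mem_filter.mpr ⟨PySem.Dict.mem_items_of_get?_eq_some d hget, by simp⟩

-- ===== VERDICT (by name: the statement is the Claim_ definition above) =====
theorem calc_race_score_spec : Claim_equal_calc_race_score := by
  intro scores _ hpre
  show calc_race_score scores = calc_race_score_alt scores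
  simp only [calc_race_score, calc_race_score_alt]
  set d := PySem.Dict.ofList scores with hd
  set race0 : PySem.Dict Int Int := PySem.Dict.ofList [(0, 0), (1, 0), (2, 0), (3, 0)] with hr
  set ws := PySem.List.sorted (PySem.Set.ofList d.values) (fun x => x) true with hws
  have hnd : d.keys.Nodup := PySem.Dict.nodup_keys_ofList scores
  -- every key of d is one of the four players
  have hkeys : ∀ k ∈ d.keys, k = 0 ∨ k = 1 ∨ k = 2 ∨ k = 3 := by
    intro k hk
    have h1 : d.keys = PySem.Set.update PySem.Dict.empty.keys (scores.map Prod.fst) :=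
      PySem.Dict.keys_foldl_insert_key scores Prod.fst (fun _ p => p.2) PySem.Dict.empty
    have h2 : k ∈ PySem.Set.ofList (scores.map Prod.fst) := by
      rw [h1] at hk; exact hk
    have h3 : k ∈ scores.map Prod.fst := (PySem.Set.mem_ofList _ _).mp h2
    rcases List.mem_map.mp h3 with ⟨q, hq, rfl⟩
    exact hpre q hq
  have hklen : d.keys.length ≤ 4 := by
    have hsub : d.keys ⊆ [0, 1, 2, 3] := by
      intro k hk; rcases hkeys k hk with rfl | rfl | rfl | rfl <;> simp
    simpa using (List.subperm_of_subset hnd hsub).length_le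
  -- properties of ws
  have hperm : ws.Perm (PySem.Set.ofList d.values) := PySem.List.sorted_perm _ _ _
  have hwnd : ws.Nodup := (hperm.nodup_iff).mpr (PySem.Set.nodup_ofList _)
  have hpw : ws.Pairwise (· > ·) := by
    have h1 := PySem.List.sorted_pairwise_rev (PySem.Set.ofList d.values) (fun x => x)
    have h2 : ws.Pairwise (· ≠ ·) := hwnd
    exact (List.Pairwise.and (hws ▸ h1) h2).imp (fun hab => by omega)
  have hws_len : ws.length ≤ 4 := by
    have h1 : ws.length = (PySem.Set.ofList d.values).length := PySem.List.length_sorted _ _ _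
    have h2 := pv_ofList_length_le d.values
    have h3 : d.values.length = d.keys.length := by
      simp [PySem.Dict.values, PySem.Dict.keys]
    omega
  -- keys of both final dicts
  have hitems_keys : ∀ pv ∈ d.items, pv.1 = 0 ∨ pv.1 = 1 ∨ pv.1 = 2 ∨ pv.1 = 3 :=
    fun pv h => hkeys pv.1 (PySem.Dict.mem_keys_of_mem_items d h)
  have hr0keys : race0.keys = [0, 1, 2, 3] := by decide
  have hfkA : ((ws.map (fun i => (i, pvGroup d i))).foldl pvStep (race0, 0)).1.keys = race0.keys := by
    apply pv_fold_keys
    intro g hg x hx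
    rcases List.mem_map.mp hg with ⟨i, _, rfl⟩
    have hxi : (x, i) ∈ d.items := (pv_group_mem d i x).mp hx
    rw [hr0keys]
    rcases hitems_keys (x, i) hxi with h | h | h | h <;> simp_all
  have hfkB : (d.items.foldl (fun rs pv =>
        rs.modify pv.1 0
          (· + (4 - (((PySem.Set.ofList d.values).filter (fun v => decide (pv.2 < v))).map (fun _ => (1 : Int))).sum)))
      race0).keys = race0.keys := by
    rw [PySem.Dict.keys_foldl_modify_key d.items (fun pv => pv.1) 0
          (fun _ pv => (· + (4 - (((PySem.Set.ofList d.values).filter (fun v => decide (pv.2 < v))).map (fun _ => (1 : Int))).sum))) race0]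
    apply pv_set_update_eq_self
    intro x hx
    rcases List.mem_map.mp hx with ⟨pv, hpv, rfl⟩
    rw [hr0keys]
    rcases hitems_keys pv hpv with h | h | h | h <;> simp_all
  have hndA : ((ws.map (fun i => (i, pvGroup d i))).foldl pvStep (race0, 0)).1.keys.Nodup := by
    rw [hfkA, hr0keys]; decide
  have hndB : (d.items.foldl (fun rs pv =>
        rs.modify pv.1 0
          (· + (4 - (((PySem.Set.ofList d.values).filter (fun v => decide (pv.2 < v))).map (fun _ => (1 : Int))).sum)))
      race0).keys.Nodup := by
    rw [hfkB, hr0keys]; decide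
  rw [PySem.Dict.items_eq_map_keys _ hndA 0, PySem.Dict.items_eq_map_keys _ hndB 0,
      hfkA, hfkB, hr0keys]
  apply List.map_congr_left
  intro p hp
  have hp4 : p = 0 ∨ p = 1 ∨ p = 2 ∨ p = 3 := by simpa using hp
  have hr0 : race0.getD p 0 = 0 := by rcases hp4 with rfl | rfl | rfl | rfl <;> decide
  rw [pv_fold_getD, pv_b_getD, hr0, zero_add, zero_add]
  cases hget : d.get? p with
  | none =>
      rw [pv_aux_none d hnd ws p hget 0, pv_filter_items_none d p hget]
      simp
  | some v =>
      have hvmem : v ∈ ws := by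
        rw [hws, PySem.List.mem_sorted, PySem.Set.mem_ofList]
        exact List.mem_map.mpr ⟨(p, v), PySem.Dict.mem_items_of_get?_eq_some d hget, rfl⟩
      rw [pv_aux_some d hnd ws p v hget hpw hvmem 0,
          pv_filter_items_some d hnd p v hget]
      have hclt : ws.countP (fun w => decide (v < w)) < 4 :=
        lt_of_lt_of_le (pv_countP_lt ws v hvmem) hws_len
      simp only [List.map_cons, List.map_nil, List.sum_cons, List.sum_nil, add_zero]
      rw [PySem.List.sum_map_const_int, mul_one, ← List.countP_eq_length_filter,
          ← hperm.countP_eq (fun w => decide (v < w))]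
      rw [zero_add, PySem.List.pyGetD_natCast]
      congr 1
      set c := ws.countP (fun w => decide (v < w)) with hc
      interval_cases c <;> decide
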